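-- pv_equiv track=rewrite | github.com/TenmonAI/tenmon-ark | api/automation/tenmon_final_pwa_lived_experience_reveal_v1.py | has_duplicate_lines
-- ===== SOURCE A (Python) =====
-- def has_duplicate_lines(text: str):
--     lines = [x.strip() for x in (text or "").splitlines() if x.strip()]
--     seen = set()
--     for ln in lines:
--         if len(ln) >= 8 and ln in seen:
--             return True
--         seen.add(ln)
--     return False
-- ===== SOURCE B (Python) =====
-- def has_duplicate_lines(text: str):
--     lines = [x.strip() for x in (text or "").splitlines() if x.strip()]
--     longs = sorted(ln for ln in lines if len(ln) >= 8)
--     return any(a == b for a, b in zip(longs, longs[1:]))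
-- ===== Notes on version B (the rewrite author's own statement) =====
-- stated objective: alternative
-- what changed: Replaces A's incremental seen-set membership loop with filtering the long lines, sorting them, and checking adjacent pairs for equality.
import Mathlib
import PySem

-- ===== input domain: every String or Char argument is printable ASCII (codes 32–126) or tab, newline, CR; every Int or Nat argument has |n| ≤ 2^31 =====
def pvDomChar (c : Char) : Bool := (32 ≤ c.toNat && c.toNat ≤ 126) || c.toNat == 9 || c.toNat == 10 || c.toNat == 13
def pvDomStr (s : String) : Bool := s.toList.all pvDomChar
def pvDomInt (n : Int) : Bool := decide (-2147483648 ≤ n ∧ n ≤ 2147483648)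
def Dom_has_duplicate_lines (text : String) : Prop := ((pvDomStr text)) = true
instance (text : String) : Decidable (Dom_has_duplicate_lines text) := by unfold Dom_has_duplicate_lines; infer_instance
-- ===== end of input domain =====

-- B replaces A's incremental seen-set loop by sort-then-adjacent-equality on the long lines; alternative algorithm, return value identical.

-- ===== PORT A =====
-- lines = [x.strip() for x in (text or "").splitlines() if x.strip()]
-- ('text or ""' is 'text' itself when text = "", so it is ported as text)
def pvLines (text : String) : List String :=
  ((PySem.Str.splitlines text).map PySem.Str.strip).filter (fun s => s ≠ "")

-- the for-loop over lines with the accumulating set 'seen'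
def pvLoopA : List String → PySem.Set String → Bool
  | [], _ => false
  | ln :: rest, seen =>
      if 8 ≤ PySem.Str.len ln ∧ PySem.Set.contains seen ln then true
      else pvLoopA rest (PySem.Set.add seen ln)

def has_duplicate_lines (text : String) : Bool :=
  pvLoopA (pvLines text) PySem.Set.empty

-- ===== PORT B =====
-- any(a == b for a, b in zip(longs, longs[1:]))
def pvAdjDup : List String → Bool
  | a :: b :: t => a == b || pvAdjDup (b :: t)
  | _ => false

def has_duplicate_lines_alt (text : String) : Bool :=
  pvAdjDup (PySem.List.sorted ((pvLines text).filter (fun ln => 8 ≤ PySem.Str.len ln)) (fun x => x) false)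

-- ===== PRECONDITION & SPEC =====
def Spec_has_duplicate_lines (text : String) (out : Bool) : Prop := out = has_duplicate_lines_alt text
instance (text : String) (out : Bool) : Decidable (Spec_has_duplicate_lines text out) := by unfold Spec_has_duplicate_lines; infer_instance

-- ===== CLAIM (what is proved, stated in full; the proofs are below) =====
def Claim_equal_has_duplicate_lines : Prop := ∀ (text : String), Dom_has_duplicate_lines text → Spec_has_duplicate_lines text (has_duplicate_lines text)

-- ===== LEMMAS AND PROOFS =====

-- A's loop returns true iff some long line is already in 'seen' or occurs twice in the list.
theorem pvLoopA_iff (lines : List String) : ∀ (seen : PySem.Set String),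
    pvLoopA lines seen = true ↔
      ∃ ln, 8 ≤ PySem.Str.len ln ∧ ln ∈ lines ∧ (ln ∈ seen ∨ 2 ≤ lines.count ln) := by
  induction lines with
  | nil => intro seen; simp [pvLoopA]
  | cons x rest ih =>
    intro seen
    simp only [pvLoopA]
    split_ifs with h
    · obtain ⟨hlen, hmem⟩ := h
      simp only [true_iff]
      exact ⟨x, hlen, List.mem_cons_self, Or.inl ((PySem.Set.contains_iff _ _).mp hmem)⟩
    · rw [ih]
      constructor
      · rintro ⟨ln, hlen, hm, hc⟩
        refine ⟨ln, hlen, List.mem_cons_of_mem _ hm, ?_⟩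
        rcases hc with hs | hcnt
        · rcases (PySem.Set.mem_add _ _ _).mp hs with hs | rfl
          · exact Or.inl hs
          · right
            have h1 : 1 ≤ rest.count ln := List.count_pos_iff.mpr hm
            rw [List.count_cons_self]; omega
        · right; rw [List.count_cons]; omega
      · rintro ⟨ln, hlen, hm, hc⟩
        rcases List.mem_cons.mp hm with rfl | hm'
        · -- ln = x; since the guard failed and x is long, x ∉ seen
          have hns : ¬ ln ∈ seen := fun hs => h ⟨hlen, (PySem.Set.contains_iff _ _).mpr hs⟩
          have hcnt : 2 ≤ (ln :: rest).count ln := by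
            rcases hc with hs | hcnt
            · exact absurd hs hns
            · exact hcnt
          have hr : 1 ≤ rest.count ln := by
            rw [List.count_cons_self] at hcnt; omega
          exact ⟨ln, hlen, List.count_pos_iff.mp (by omega),
            Or.inl ((PySem.Set.mem_add _ _ _).mpr (Or.inr rfl))⟩
        · refine ⟨ln, hlen, hm', ?_⟩
          rcases hc with hs | hcnt
          · exact Or.inl ((PySem.Set.mem_add _ _ _).mpr (Or.inl hs))
          · by_cases hx : ln = x
            · subst hx; exact Or.inl ((PySem.Set.mem_add _ _ _).mpr (Or.inr rfl))
            · right
              rw [List.count_cons] at hcnt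
              rw [beq_eq_false_iff_ne.mpr (fun he => hx he.symm)] at hcnt
              simpa using hcnt

-- On a ≤-sorted list, an adjacent equal pair exists iff the list has a duplicate.
theorem pvAdjDup_iff (l : List String) (hs : l.Pairwise (· ≤ ·)) :
    pvAdjDup l = true ↔ ¬ l.Nodup := by
  induction l with
  | nil => simp [pvAdjDup]
  | cons a t ih =>
    cases t with
    | nil => simp [pvAdjDup]
    | cons b u =>
      rcases List.pairwise_cons.mp hs with ⟨hab, hbt⟩
      rw [show pvAdjDup (a :: b :: u) = (a == b || pvAdjDup (b :: u)) from rfl]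
      rw [Bool.or_eq_true, beq_iff_eq, ih hbt]
      constructor
      · rintro (rfl | hnd)
        · simp [List.nodup_cons]
        · intro hnd'
          exact hnd (List.nodup_cons.mp hnd').2
      · intro hnd
        by_cases hab' : a = b
        · exact Or.inl hab'
        · right
          intro hnd'
          apply hnd
          rw [List.nodup_cons]
          refine ⟨?_, hnd'⟩
          intro hmem
          rcases List.mem_cons.mp hmem with rfl | hmu
          · exact hab' rfl
          · have hle : a ≤ b := hab b List.mem_cons_self
            have hble : b ≤ a := (List.pairwise_cons.mp hbt).1 a hmu
            exact hab' (le_antisymm hle hble)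

-- a list has a duplicate iff some element has count ≥ 2
theorem not_nodup_iff_count (l : List String) : ¬ l.Nodup ↔ ∃ x, x ∈ l ∧ 2 ≤ l.count x := by
  constructor
  · intro h
    rw [List.nodup_iff_count_le_one] at h
    push Not at h
    obtain ⟨x, hx⟩ := h
    exact ⟨x, List.count_pos_iff.mp (by omega), by omega⟩
  · rintro ⟨x, _, hx⟩ hnd
    have := List.nodup_iff_count_le_one.mp hnd x
    omega

-- ===== VERDICT (by name: the statement is the Claim_ definition above) =====
theorem has_duplicate_lines_spec : Claim_equal_has_duplicate_lines := by
  intro text _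
  unfold Spec_has_duplicate_lines has_duplicate_lines has_duplicate_lines_alt
  set lines := pvLines text with hl
  set longs0 := lines.filter (fun ln => decide (8 ≤ PySem.Str.len ln)) with hl0
  set longs := PySem.List.sorted longs0 (fun x => x) false with hls
  have hperm : longs.Perm longs0 := PySem.List.sorted_perm longs0 (fun x => x) false
  have hpw : longs.Pairwise (· ≤ ·) := by
    have := PySem.List.sorted_pairwise longs0 (fun x => x)
    simpa [hls] using this
  have hcount : ∀ x, 8 ≤ PySem.Str.len x → longs0.count x = lines.count x := by
    intro x hx
    rw [hl0]
    exact List.count_filter (by simpa using hx)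
  rw [Bool.eq_iff_iff, pvLoopA_iff, pvAdjDup_iff longs hpw, not_nodup_iff_count]
  simp only [PySem.Set.empty, List.not_mem_nil, false_or]
  constructor
  · rintro ⟨ln, hlen, hm, hcnt⟩
    refine ⟨ln, ?_, ?_⟩
    · rw [hperm.mem_iff, hl0, List.mem_filter]
      exact ⟨hm, by simpa using hlen⟩
    · rw [hperm.count_eq, hcount ln hlen]
      exact hcnt
  · rintro ⟨x, hx, hcnt⟩
    have hx0 : x ∈ longs0 := hperm.mem_iff.mp hx
    have hlong : 8 ≤ PySem.Str.len x := by
      have h2 := List.of_mem_filter (p := fun ln => decide (8 ≤ PySem.Str.len ln)) (hl0 ▸ hx0)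
      exact of_decide_eq_true h2
    have hcnt0 : 2 ≤ lines.count x := by
      rw [← hcount x hlong, ← hperm.count_eq]
      exact hcnt
    exact ⟨x, hlong, List.mem_of_mem_filter (hl0 ▸ hx0), hcnt0⟩
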